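-- pv_equiv track=rewrite | github.com/garimto81/ebs | pull_ebs_drive.py | text_to_markdown_lines
-- ===== SOURCE A (Python) =====
-- def text_to_markdown_lines(text: str) -> list[str]:
--     """
--     Google Docs plain text export를 markdown과 비교 가능한 형태로 정규화.
--     - 연속 공백 라인 제거
--     - 앞뒤 공백 트림
--     """
--     lines = text.splitlines()
--     normalized = []
--     prev_blank = False
--     for line in lines:
--         stripped = line.rstrip()
--         is_blank = stripped == ""
--         if is_blank and prev_blank:
--             continue  # 연속 공백 제거
--         normalized.append(stripped)
--         prev_blank = is_blank
--     return normalized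
-- ===== SOURCE B (Python) =====
-- from itertools import groupby
--
-- def text_to_markdown_lines(text: str) -> list[str]:
--     stripped = [line.rstrip() for line in text.splitlines()]
--     out = []
--     for is_blank, group in groupby(stripped, key=lambda s: s == ""):
--         if is_blank:
--             out.append("")
--         else:
--             out.extend(group)
--     return out
-- ===== Notes on version B (the rewrite author's own statement) =====
-- stated objective: alternative
-- what changed: Replaces A's single-pass loop with a prev_blank flag by a two-stage decomposition: rstrip all lines, group consecutive lines by blankness with itertools.groupby, then emit a single empty line per blank group and all lines of each non-blank group.
import Mathlib
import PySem

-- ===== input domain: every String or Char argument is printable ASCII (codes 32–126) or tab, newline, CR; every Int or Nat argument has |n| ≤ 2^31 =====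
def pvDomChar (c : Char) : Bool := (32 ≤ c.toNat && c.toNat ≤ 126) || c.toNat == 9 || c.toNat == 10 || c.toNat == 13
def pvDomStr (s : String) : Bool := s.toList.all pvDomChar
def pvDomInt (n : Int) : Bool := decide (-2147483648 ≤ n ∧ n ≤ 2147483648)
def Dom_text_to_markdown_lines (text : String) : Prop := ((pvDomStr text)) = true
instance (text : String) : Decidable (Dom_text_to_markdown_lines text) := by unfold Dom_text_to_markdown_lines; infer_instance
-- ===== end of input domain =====

-- B replaces A's prev_blank single-pass flag loop by a two-stage shape: rstrip all lines,
-- group consecutive lines by blankness (itertools.groupby), and emit one "" per blank group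
-- and all lines of each non-blank group; same cost, different decomposition ('alternative').

-- ===== PORT A =====
def text_to_markdown_lines (text : String) : List String :=
  let lines := PySem.Str.splitlines text
  let st := lines.foldl (fun (st : List String × Bool) line =>
    let stripped := PySem.Str.rstrip line
    let is_blank := stripped == ""
    if is_blank && st.2 then st
    else (st.1 ++ [stripped], is_blank)) ([], false)
  st.1

-- ===== PORT B =====
-- hand-written port of itertools.groupby(·, key = (· == "")): yields (key, run) pairs of
-- maximal consecutive runs with equal key
def pvGroupby (ls : List String) : List (Bool × List String) :=
  match ls with
  | [] => []
  | l :: rest =>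
    let b := (l == "")
    let p := rest.span (fun x => (x == "") == b)
    (b, l :: p.1) :: pvGroupby p.2
termination_by ls.length
decreasing_by
  simp only [List.span_eq_takeWhile_dropWhile]
  have := List.length_dropWhile_le (fun x => (x == "") == b) rest
  simp; omega

def text_to_markdown_lines_alt (text : String) : List String :=
  let stripped := (PySem.Str.splitlines text).map PySem.Str.rstrip
  (pvGroupby stripped).flatMap (fun kg => if kg.1 then [""] else kg.2)

-- ===== PRECONDITION & SPEC =====
def Spec_text_to_markdown_lines (text : String) (out : List String) : Prop := out = text_to_markdown_lines_alt text
instance (text : String) (out : List String) : Decidable (Spec_text_to_markdown_lines text out) := by unfold Spec_text_to_markdown_lines; infer_instance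

-- ===== CLAIM (what is proved, stated in full; the proofs are below) =====
def Claim_equal_text_to_markdown_lines : Prop := ∀ (text : String), Dom_text_to_markdown_lines text → Spec_text_to_markdown_lines text (text_to_markdown_lines text)

-- ===== LEMMAS AND PROOFS =====

-- A's loop as a structural recursion over the already-stripped lines
def loopA : Bool → List String → List String
  | _, [] => []
  | prev, l :: ls => if l == "" && prev then loopA prev ls else l :: loopA (l == "") ls

-- A's loop body, named so the fold lemma can be stated (defeq to the lambda in the port)
def stepA (st : List String × Bool) (line : String) : List String × Bool :=
  let stripped := PySem.Str.rstrip line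
  let is_blank := stripped == ""
  if is_blank && st.2 then st
  else (st.1 ++ [stripped], is_blank)

theorem foldA (lines : List String) : ∀ (acc : List String) (prev : Bool),
    (lines.foldl stepA (acc, prev)).1
    = acc ++ loopA prev (lines.map PySem.Str.rstrip) := by
  induction lines with
  | nil => intro acc prev; simp [loopA]
  | cons l ls ih =>
    intro acc prev
    rw [List.foldl_cons]
    by_cases h : (PySem.Str.rstrip l == "" && prev) = true
    · have hs : stepA (acc, prev) l = (acc, prev) := by simp [stepA, h]
      rw [hs, ih]
      simp [loopA, h]
    · have hs : stepA (acc, prev) l = (acc ++ [PySem.Str.rstrip l], PySem.Str.rstrip l == "") := by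
        simp only [stepA]
        rw [if_neg h]
      rw [hs, ih]
      simp [loopA, h, List.append_assoc]

theorem loopA_nonblank_run (rest : List String) : ∀ (g : List String),
    (∀ x ∈ g, ¬ x = "") → loopA false (g ++ rest) = g ++ loopA false rest := by
  intro g
  induction g with
  | nil => simp
  | cons x xs ih =>
    intro h
    have hx : (x == "") = false := by
      simpa using h x (by simp)
    simp [loopA, hx, ih fun y hy => h y (by simp [hy])]

theorem loopA_blank_run (rest : List String) : ∀ (g : List String),
    (∀ x ∈ g, x = "") → loopA true (g ++ rest) = loopA true rest := by
  intro g
  induction g with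
  | nil => simp
  | cons x xs ih =>
    intro h
    have hx : (x == "") = true := by simpa using h x (by simp)
    simp [loopA, hx, ih fun y hy => h y (by simp [hy])]

theorem loopA_true_false (ls : List String) (h : ls.head?.all (fun x => !(x == ""))) :
    loopA true ls = loopA false ls := by
  cases ls with
  | nil => rfl
  | cons l ls =>
    simp only [List.head?_cons, Option.all_some] at h
    simp only [loopA]
    rw [show (l == "") = false by simpa using h]
    simp

theorem main_eq : ∀ (n : ℕ) (ls : List String), ls.length ≤ n →
    loopA false ls = (pvGroupby ls).flatMap (fun kg => if kg.1 then [""] else kg.2) := by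
  intro n
  induction n with
  | zero =>
    intro ls h
    have : ls = [] := List.eq_nil_of_length_eq_zero (Nat.le_zero.mp h)
    simp [this, pvGroupby, loopA]
  | succ n ih =>
    intro ls h
    match ls with
    | [] => simp [pvGroupby, loopA]
    | l :: rest =>
      rw [pvGroupby]
      have hsplit :=
        (List.takeWhile_append_dropWhile (p := fun x => (x == "") == (l == "")) (l := rest)).symm
      have hg : ∀ x ∈ rest.takeWhile (fun x => (x == "") == (l == "")),
          ((x == "") == (l == "")) = true :=
        fun x hx => List.mem_takeWhile_imp (p := fun x => (x == "") == (l == "")) hx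
      have hlen : (rest.dropWhile (fun x => (x == "") == (l == ""))).length ≤ n := by
        have := List.length_dropWhile_le (fun x => (x == "") == (l == "")) rest
        simp at h; omega
      have ihr := ih _ hlen
      have hhead := List.head?_dropWhile_not (fun x => (x == "") == (l == "")) rest
      rw [List.span_eq_takeWhile_dropWhile]
      simp only [List.flatMap_cons]
      by_cases hl : (l == "") = true
      · -- the head line is blank
        simp only [hl] at hsplit hg ihr hhead ⊢
        have hgb : ∀ x ∈ rest.takeWhile (fun x => (x == "") == true), x = "" :=
          fun x hx => by simpa using hg x hx
        have hrest : (rest.dropWhile (fun x => (x == "") == true)).head?.all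
            (fun x => !(x == "")) := by
          cases hd : (rest.dropWhile (fun x => (x == "") == true)).head? with
          | none => simp
          | some x => rw [hd] at hhead; simpa using hhead
        conv_lhs => rw [hsplit]
        simp only [loopA, hl, Bool.true_and, if_neg (by simp : ¬ false = true)]
        rw [loopA_blank_run _ _ hgb, loopA_true_false _ hrest, ihr]
        simp [show l = "" by simpa using hl]
      · -- the head line is non-blank
        have hl' : (l == "") = false := by simpa using hl
        simp only [hl'] at hsplit hg ihr hhead ⊢
        have hgb : ∀ x ∈ rest.takeWhile (fun x => (x == "") == false), ¬ x = "" :=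
          fun x hx => by simpa using hg x hx
        conv_lhs => rw [hsplit]
        simp only [loopA, hl', Bool.false_and, if_neg (by simp : ¬ false = true)]
        rw [loopA_nonblank_run _ _ hgb, ihr]
        simp

-- ===== VERDICT (by name: the statement is the Claim_ definition above) =====
theorem text_to_markdown_lines_spec : Claim_equal_text_to_markdown_lines := by
  intro text _
  show text_to_markdown_lines text = text_to_markdown_lines_alt text
  have h1 : text_to_markdown_lines text
      = loopA false ((PySem.Str.splitlines text).map PySem.Str.rstrip) := by
    have h := foldA (PySem.Str.splitlines text) [] false
    rw [List.nil_append] at h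
    exact h
  rw [h1, text_to_markdown_lines_alt,
    main_eq ((PySem.Str.splitlines text).map PySem.Str.rstrip).length _ le_rfl]
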